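-- pv_equiv track=rewrite | github.com/hmarcuzzo/redes1-IP | main.py | host_NetWork
-- ===== SOURCE A (Python) =====
-- def host_NetWork(netMask):
--     netID = 0
--     hostID = 0
--     flag = 0
--
--     for i in range(len(netMask)):
--         for j in range(2, len(netMask[i])):
--             if netMask[i][j] is '0':
--                 flag = 1
--             if flag == 0:
--                 netID += 1
--
--     hostID = 32 - netID
--
--     return netID, hostID
-- ===== SOURCE B (Python) =====
-- def host_NetWork(netMask):
--     s = ''.join(m[2:] for m in netMask)
--     idx = s.find('0')
--     netID = len(s) if idx == -1 else idx
--     return netID, 32 - netID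
-- ===== Notes on version B (the rewrite author's own statement) =====
-- stated objective: simpler
-- what changed: Replaces the nested index loops with a sticky flag by building the concatenation of the per-string tails m[2:] once and locating the first '0' with a single str.find.
import Mathlib
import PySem

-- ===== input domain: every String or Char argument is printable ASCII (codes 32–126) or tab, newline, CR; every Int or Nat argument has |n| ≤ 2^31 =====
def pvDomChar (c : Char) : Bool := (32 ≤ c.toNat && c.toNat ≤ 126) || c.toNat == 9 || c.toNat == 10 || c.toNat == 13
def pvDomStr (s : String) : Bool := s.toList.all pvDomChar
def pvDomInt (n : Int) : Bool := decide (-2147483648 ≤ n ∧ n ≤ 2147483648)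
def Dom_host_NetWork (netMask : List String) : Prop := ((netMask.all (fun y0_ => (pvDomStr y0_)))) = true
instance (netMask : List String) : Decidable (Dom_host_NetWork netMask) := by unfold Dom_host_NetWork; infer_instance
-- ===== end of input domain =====

-- B replaces A's nested index loops with a sticky flag by: concatenate the per-string
-- tails once, then locate the first '0' with a single find (objective: simpler).

-- ===== PORT A =====
-- literal transliteration of A: nested index loops, state (netID, flag); hostID at the end
def host_NetWork (netMask : List String) : Int × Int :=
  let st : Int × Int :=
    netMask.foldl (fun st m =>
      (PySem.List.pyRange 2 (PySem.Str.len m) 1).foldl (fun st j =>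
        let flag : Int := if PySem.List.pyGetD m.toList j ' ' = '0' then 1 else st.2
        let netID : Int := if flag = 0 then st.1 + 1 else st.1
        (netID, flag)) st) (0, 0)
  (st.1, 32 - st.1)

-- ===== PORT B =====
-- literal transliteration of B: join the tails m[2:], find the first '0'
def host_NetWork_alt (netMask : List String) : Int × Int :=
  let s : String := PySem.Str.join "" (netMask.map (fun m => PySem.Str.slice m (some 2) none))
  let idx : Int := PySem.Str.find s "0"
  let netID : Int := if idx = -1 then PySem.Str.len s else idx
  (netID, 32 - netID)

-- ===== PRECONDITION & SPEC =====
def Spec_host_NetWork (netMask : List String) (out : Int × Int) : Prop := out = host_NetWork_alt netMask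
instance (netMask : List String) (out : Int × Int) : Decidable (Spec_host_NetWork netMask out) := by unfold Spec_host_NetWork; infer_instance

-- ===== CLAIM (what is proved, stated in full; the proofs are below) =====
def Claim_equal_host_NetWork : Prop := ∀ (netMask : List String), Dom_host_NetWork netMask → Spec_host_NetWork netMask (host_NetWork netMask)

-- ===== LEMMAS AND PROOFS =====

-- A's loop body as a function of the character read
def pvStep (st : Int × Int) (c : Char) : Int × Int :=
  let flag : Int := if c = '0' then 1 else st.2
  let netID : Int := if flag = 0 then st.1 + 1 else st.1
  (netID, flag)

-- the concatenation of the per-string tails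
def pvTail (netMask : List String) : List Char :=
  (netMask.map (fun m => m.toList.drop 2)).flatten

lemma pvStep_flag1 (L : List Char) (n : Int) : L.foldl pvStep (n, 1) = (n, 1) := by
  induction L with
  | nil => rfl
  | cons c L ih =>
    have h1 : pvStep (n, 1) c = (n, 1) := by simp [pvStep]
    rw [List.foldl_cons, h1, ih]

lemma pvStep_flag0 (L : List Char) (n : Int) :
    L.foldl pvStep (n, 0) =
      (n + ((L.takeWhile (fun c => !(c == '0'))).length : Int),
       if '0' ∈ L then 1 else 0) := by
  induction L generalizing n with
  | nil => simp
  | cons c L ih =>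
    by_cases hc : c = '0'
    · subst hc
      have h1 : pvStep (n, 0) '0' = (n, 1) := by simp [pvStep]
      rw [List.foldl_cons, h1, pvStep_flag1]
      simp
    · have h1 : pvStep (n, 0) c = (n + 1, 0) := by simp [pvStep, hc]
      rw [List.foldl_cons, h1, ih]
      have hm : ('0' ∈ c :: L) = ('0' ∈ L) := by simp [Ne.symm hc]
      refine Prod.ext ?_ ?_
      · simp only [List.takeWhile_cons]
        simp [hc]
        omega
      · simp [hm]

-- A's whole computation is the fold of pvStep over pvTail
lemma host_NetWork_eq_fold (netMask : List String) :
    host_NetWork netMask =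
      (((pvTail netMask).foldl pvStep (0, 0)).1,
       32 - ((pvTail netMask).foldl pvStep (0, 0)).1) := by
  unfold host_NetWork pvTail
  have h : ∀ (st : Int × Int) (m : String),
      (PySem.List.pyRange 2 (PySem.Str.len m) 1).foldl (fun st j =>
        let flag : Int := if PySem.List.pyGetD m.toList j ' ' = '0' then 1 else st.2
        let netID : Int := if flag = 0 then st.1 + 1 else st.1
        (netID, flag)) st = (m.toList.drop 2).foldl pvStep st := by
    intro st m
    have := PySem.List.foldl_pyRange_pyGetD' m.toList ' ' pvStep st (a := 2) (by norm_num)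
    simpa [PySem.Str.len_eq, pvStep] using this
  simp only [h, List.foldl_flatten, List.foldl_map]

-- [c] is a prefix of l exactly when l starts with c
lemma pvPrefix_singleton (c : Char) (l : List Char) : [c] <+: l ↔ l.head? = some c := by
  cases l with
  | nil => simp
  | cons a t => simp [List.cons_prefix_cons, eq_comm]

-- ''.join is concatenation
lemma pvJoin_nil_eq_flatten (l : List (List Char)) : PySem.Chars.join [] l = l.flatten := by
  induction l with
  | nil => simp [PySem.Chars.join_nil]
  | cons p rest ih =>
    cases rest with
    | nil => simp [PySem.Chars.join_singleton]
    | cons q rest' => rw [PySem.Chars.join_cons_cons, ih]; simp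

-- the first '0' of cs, as find locates it, is where takeWhile (≠ '0') stops
lemma find_zero_eq (cs : List Char) :
    PySem.Chars.find cs ['0'] =
      if '0' ∈ cs then ((cs.takeWhile (fun c => !(c == '0'))).length : Int)
      else -1 := by
  by_cases h : '0' ∈ cs
  · simp only [h, if_true]
    have hinf : ['0'] <:+: cs := by
      obtain ⟨s, t, rfl⟩ := List.append_of_mem h
      exact ⟨s, t, by simp⟩
    have hnn : 0 ≤ PySem.Chars.find cs ['0'] := (PySem.Chars.find_nonneg_iff cs ['0']).mpr hinf
    obtain ⟨hpre, hmin⟩ := PySem.Chars.find_spec hnn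
    set p : Char → Bool := fun c => !(c == '0') with hp
    set k := (cs.takeWhile p).length with hk
    -- cs.drop k is the dropWhile part
    have hdrop : cs.drop k = cs.dropWhile p := by
      have := List.drop_left (l₁ := cs.takeWhile p) (l₂ := cs.dropWhile p)
      rwa [List.takeWhile_append_dropWhile] at this
    -- '0' lives in the dropWhile part
    have hmem : '0' ∈ cs.dropWhile p := by
      have := List.takeWhile_append_dropWhile (p := p) (l := cs)
      rw [← this] at h
      rcases List.mem_append.mp h with h1 | h1
      · have := List.mem_takeWhile_imp h1
        simp [hp] at this
      · exact h1
    -- prefix at k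
    have hprek : ['0'] <+: cs.drop k := by
      rw [hdrop, pvPrefix_singleton]
      cases hdw : cs.dropWhile p with
      | nil => rw [hdw] at hmem; simp at hmem
      | cons a t =>
        have h2 := List.head?_dropWhile_not p cs
        rw [hdw] at h2
        simp [hp] at h2
        simp [h2]
    -- F ≤ k by minimality
    have hFk : (PySem.Chars.find cs ['0']).toNat ≤ k := by
      by_contra hlt
      exact hmin k (by omega) hprek
    -- k ≤ F: indices below k carry a non-'0' character
    have hkF : k ≤ (PySem.Chars.find cs ['0']).toNat := by
      by_contra hlt
      rw [not_le] at hlt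
      set F := (PySem.Chars.find cs ['0']).toNat with hF
      have hFt : F < (cs.takeWhile p).length := by omega
      have hget : cs[F]? = some ((cs.takeWhile p)[F]'hFt) := by
        conv_lhs => rw [← List.takeWhile_append_dropWhile (p := p) (l := cs)]
        rw [List.getElem?_append_left hFt]
        simp
      have hpv : p ((cs.takeWhile p)[F]'hFt) = true :=
        List.mem_takeWhile_imp (List.getElem_mem hFt)
      have := (pvPrefix_singleton '0' (cs.drop F)).mp hpre
      rw [List.head?_drop, hget] at this
      simp at this
      rw [this] at hpv
      simp [hp] at hpv
    omega
  · simp only [h, if_false]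
    rw [PySem.Chars.find_eq_neg_one_iff]
    intro ⟨s, t, heq⟩
    exact h (by rw [← heq]; simp)

theorem host_NetWork_spec_aux (netMask : List String) :
    host_NetWork netMask = host_NetWork_alt netMask := by
  rw [host_NetWork_eq_fold]
  have hs : (PySem.Str.join "" (netMask.map (fun m => PySem.Str.slice m (some 2) none))).toList
      = pvTail netMask := by
    rw [PySem.Str.toList_join, List.map_map]
    have : (fun m => (PySem.Str.slice m (some 2) none).toList) =
        (fun m : String => m.toList.drop 2) := by
      funext m
      rw [PySem.Str.toList_slice, PySem.Chars.slice_eq_listSlice,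
        PySem.List.slice_from m.toList (a := 2) (by norm_num)]
      rfl
    show PySem.Chars.join "".toList (netMask.map fun m => (PySem.Str.slice m (some 2) none).toList)
      = pvTail netMask
    rw [show "".toList = ([] : List Char) from rfl, pvJoin_nil_eq_flatten, this]
    rfl
  rw [pvStep_flag0]
  simp only [host_NetWork_alt]
  rw [PySem.Str.find_eq, show "0".toList = ['0'] from rfl, hs, find_zero_eq,
    PySem.Str.len_eq, hs]
  by_cases h : '0' ∈ pvTail netMask
  · simp only [h, if_true]
    have : (((pvTail netMask).takeWhile (fun c => !(c == '0'))).length : Int) ≠ -1 := by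
      omega
    simp [this]
  · simp only [h, if_false, if_true]
    have : (pvTail netMask).takeWhile (fun c => !(c == '0')) = pvTail netMask := by
      rw [List.takeWhile_eq_self_iff]
      intro x hx
      simp
      rintro rfl
      exact h hx
    rw [this]
    simp

-- ===== VERDICT (by name: the statement is the Claim_ definition above) =====
theorem host_NetWork_spec : Claim_equal_host_NetWork := by
  intro netMask _
  unfold Spec_host_NetWork
  exact host_NetWork_spec_aux netMask
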